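-- pv_equiv track=rewrite | github.com/pypi-data/pypi-mirror-381 | packages/diffsinger-utau/diffsinger_utau-0.2.0-py3-none-any.whl/diffsinger_utau/voice_bank/pred_duration.py | cumulate_ph_dur_by_ph_num
-- ===== SOURCE A (Python) =====
-- import copy
--
-- def cumulate_ph_dur_by_ph_num(ph_dur: list, ph_num: list)-> list:
--     """根据音素数量累加时长"""
--     ph_num = copy.deepcopy(ph_num)
--     result = [0] * len(ph_num)
--     dur_idx = 0
--     num_idx = 0
--     assert sum(ph_num) == len(ph_dur), f"音素数量与时长数量不一致 {sum(ph_num)} vs {len(ph_dur)}"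
--     while dur_idx < len(ph_dur) and num_idx < len(ph_num):
--         if ph_num[num_idx] > 0:
--             result[num_idx] += ph_dur[dur_idx]
--             ph_num[num_idx] -= 1
--             dur_idx += 1
--         else:
--             num_idx += 1
--
--     return result
-- ===== SOURCE B (Python) =====
-- def cumulate_ph_dur_by_ph_num(ph_dur: list, ph_num: list) -> list:
--     """根据音素数量累加时长"""
--     assert sum(ph_num) == len(ph_dur), f"音素数量与时长数量不一致 {sum(ph_num)} vs {len(ph_dur)}"
--     result = []
--     idx = 0
--     for n in ph_num:
--         seg = max(n, 0)
--         result.append(sum(ph_dur[idx:idx + seg]))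
--         idx += seg
--     return result
-- ===== Notes on version B (the rewrite author's own statement) =====
-- stated objective: simpler
-- what changed: Replaces the two-pointer while loop that decrements a deep-copied ph_num and updates a preallocated result in place with a single for over ph_num that sums one clamped slice ph_dur[idx:idx+max(n,0)] per entry and appends it.
import Mathlib
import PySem

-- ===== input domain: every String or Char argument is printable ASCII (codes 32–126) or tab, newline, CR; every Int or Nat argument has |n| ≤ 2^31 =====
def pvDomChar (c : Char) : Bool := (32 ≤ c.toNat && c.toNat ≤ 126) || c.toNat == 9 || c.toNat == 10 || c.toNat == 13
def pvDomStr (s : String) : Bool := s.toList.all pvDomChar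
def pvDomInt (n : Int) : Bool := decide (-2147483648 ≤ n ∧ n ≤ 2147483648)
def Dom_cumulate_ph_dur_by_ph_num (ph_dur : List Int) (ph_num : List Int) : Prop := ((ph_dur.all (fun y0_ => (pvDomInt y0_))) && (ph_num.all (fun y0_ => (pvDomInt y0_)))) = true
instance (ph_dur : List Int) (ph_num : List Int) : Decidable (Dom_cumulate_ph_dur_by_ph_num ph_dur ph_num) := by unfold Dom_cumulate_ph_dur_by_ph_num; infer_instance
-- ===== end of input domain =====

-- B replaces A's two-pointer in-place while loop by one pass over ph_num summing a clamped slice per entry (objective: simpler).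


-- ===== PORT A =====
-- the while loop of A: state (ph_num, result, dur_idx, num_idx); list indexing is
-- always in range here because of the loop guards, so getD is exact
def pvLoopA (ph_dur : List Int) : List Int → List Int → Nat → Nat → List Int
  | ph_num, result, dur_idx, num_idx =>
    if h : dur_idx < ph_dur.length ∧ num_idx < ph_num.length then
      if ph_num.getD num_idx 0 > 0 then
        pvLoopA ph_dur (ph_num.set num_idx (ph_num.getD num_idx 0 - 1))
          (result.set num_idx (result.getD num_idx 0 + ph_dur.getD dur_idx 0))
          (dur_idx + 1) num_idx
      else
        pvLoopA ph_dur ph_num result dur_idx (num_idx + 1)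
    else result
  termination_by ph_num _ dur_idx num_idx => (ph_dur.length - dur_idx) + (ph_num.length - num_idx)
  decreasing_by
    · simp only [List.length_set]; omega
    · omega

-- the assert raises (AssertionError) outside Pre_; inside Pre_ it is a no-op, so the port starts at the loop
def cumulate_ph_dur_by_ph_num (ph_dur : List Int) (ph_num : List Int) : List Int :=
  pvLoopA ph_dur ph_num (List.replicate ph_num.length 0) 0 0

-- ===== PORT B =====
-- ph_dur[idx:idx+seg] with 0 ≤ idx and 0 ≤ seg is exactly (ph_dur.drop idx).take seg
def pvLoopB (ph_dur : List Int) : List Int → Nat → List Int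
  | [], _ => []
  | n :: rest, idx =>
    let seg := (max n 0).toNat
    ((ph_dur.drop idx).take seg).sum :: pvLoopB ph_dur rest (idx + seg)

def cumulate_ph_dur_by_ph_num_alt (ph_dur : List Int) (ph_num : List Int) : List Int :=
  pvLoopB ph_dur ph_num 0

-- ===== PRECONDITION & SPEC =====
-- A (and B) raise AssertionError exactly when sum(ph_num) ≠ len(ph_dur); Pre_ excludes exactly those inputs
def Pre_cumulate_ph_dur_by_ph_num (ph_dur : List Int) (ph_num : List Int) : Prop :=
  ph_num.sum = (ph_dur.length : Int)
instance (ph_dur : List Int) (ph_num : List Int) : Decidable (Pre_cumulate_ph_dur_by_ph_num ph_dur ph_num) := by unfold Pre_cumulate_ph_dur_by_ph_num; infer_instance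

def pvWitness_cumulate_ph_dur_by_ph_num : List Int × List Int := ([3, 1, 4, 1, 5], ([2, 0, 3] : List Int))

def Spec_cumulate_ph_dur_by_ph_num (ph_dur : List Int) (ph_num : List Int) (out : List Int) : Prop := out = cumulate_ph_dur_by_ph_num_alt ph_dur ph_num
instance (ph_dur : List Int) (ph_num : List Int) (out : List Int) : Decidable (Spec_cumulate_ph_dur_by_ph_num ph_dur ph_num out) := by unfold Spec_cumulate_ph_dur_by_ph_num; infer_instance

-- ===== CLAIM (what is proved, stated in full; the proofs are below) =====
def Claim_equal_cumulate_ph_dur_by_ph_num : Prop := ∀ (ph_dur : List Int) (ph_num : List Int), Dom_cumulate_ph_dur_by_ph_num ph_dur ph_num → Pre_cumulate_ph_dur_by_ph_num ph_dur ph_num → Spec_cumulate_ph_dur_by_ph_num ph_dur ph_num (cumulate_ph_dur_by_ph_num ph_dur ph_num)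

-- ===== LEMMAS AND PROOFS =====

-- abstraction of A's loop once the already-finished prefix (positions < num_idx) is stripped off
def pvG (ph_dur : List Int) : List Int → List Int → Nat → List Int
  | [], rs, _ => rs
  | n :: ms, rs, d =>
    if _h : d < ph_dur.length then
      match rs with
      | [] => []
      | r0 :: rs' =>
        if n > 0 then pvG ph_dur ((n - 1) :: ms) ((r0 + ph_dur.getD d 0) :: rs') (d + 1)
        else r0 :: pvG ph_dur ms rs' d
    else rs
  termination_by ms _ d => (ph_dur.length - d) + ms.length
  decreasing_by
    · simp only [List.length_cons]; omega
    · simp only [List.length_cons]; omega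

lemma pvG_cons (ph_dur : List Int) (n : Int) (ms : List Int) (r0 : Int) (rs : List Int) (d : Nat) :
    pvG ph_dur (n :: ms) (r0 :: rs) d
      = if d < ph_dur.length then
          (if n > 0 then pvG ph_dur ((n - 1) :: ms) ((r0 + ph_dur.getD d 0) :: rs) (d + 1)
           else r0 :: pvG ph_dur ms rs d)
        else r0 :: rs := by
  rw [pvG]
  by_cases h : d < ph_dur.length <;> simp [h]

lemma pvG_stop (ph_dur : List Int) (ms rs : List Int) (d : Nat) (h : ph_dur.length ≤ d) :
    pvG ph_dur ms rs d = rs := by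
  cases ms with
  | nil => rw [pvG]
  | cons n ms =>
    cases rs with
    | nil => rw [pvG]; simp [Nat.not_lt.mpr h]
    | cons r0 rs => rw [pvG_cons]; simp [Nat.not_lt.mpr h]

lemma pvG_group_nat (ph_dur : List Int) (c : Nat) :
    ∀ (ms rs : List Int) (r0 : Int) (d : Nat),
      pvG ph_dur ((c : Int) :: ms) (r0 :: rs) d
        = (r0 + ((ph_dur.drop d).take c).sum) :: pvG ph_dur ms rs (d + c) := by
  induction c with
  | zero =>
    intro ms rs r0 d
    rw [pvG_cons]
    by_cases h : d < ph_dur.length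
    · simp [h]
    · simp [h, pvG_stop ph_dur ms rs d (Nat.not_lt.mp h)]
  | succ c ih =>
    intro ms rs r0 d
    rw [pvG_cons]
    by_cases h : d < ph_dur.length
    · have hpos : ((c + 1 : Nat) : Int) > 0 := by positivity
      rw [if_pos h, if_pos hpos]
      have hsub : ((c + 1 : Nat) : Int) - 1 = (c : Int) := by push_cast; ring
      rw [hsub, ih ms rs (r0 + ph_dur.getD d 0) (d + 1)]
      have hget : ph_dur.getD d 0 = ph_dur[d] := List.getD_eq_getElem ph_dur 0 h
      have hdrop : ph_dur.drop d = ph_dur[d] :: ph_dur.drop (d + 1) :=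
        List.drop_eq_getElem_cons h
      have harith : d + 1 + c = d + (c + 1) := by omega
      rw [hget, hdrop, harith, List.take_succ_cons, List.sum_cons]
      congr 1
      ring
    · rw [if_neg h]
      have hle : ph_dur.length ≤ d := Nat.not_lt.mp h
      rw [pvG_stop ph_dur ms rs (d + (c + 1)) (by omega), List.drop_eq_nil_of_le hle]
      simp

lemma pvG_group (ph_dur : List Int) (n : Int) (ms rs : List Int) (r0 : Int) (d : Nat) :
    pvG ph_dur (n :: ms) (r0 :: rs) d
      = (r0 + ((ph_dur.drop d).take (max n 0).toNat).sum) :: pvG ph_dur ms rs (d + (max n 0).toNat) := by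
  by_cases hn : n > 0
  · lift n to Nat using hn.le with c
    have hm : (max (c : Int) 0).toNat = c := by simp
    rw [hm, pvG_group_nat]
  · have hm : (max n 0).toNat = 0 := by omega
    rw [hm, pvG_cons]
    by_cases h : d < ph_dur.length
    · simp [h, hn]
    · simp [h, pvG_stop ph_dur ms rs d (Nat.not_lt.mp h)]

lemma pvG_eq_loopB (ph_dur : List Int) :
    ∀ (ms : List Int) (d : Nat),
      pvG ph_dur ms (List.replicate ms.length 0) d = pvLoopB ph_dur ms d := by
  intro ms
  induction ms with
  | nil =>
    intro d
    simp only [List.length_nil, List.replicate_zero]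
    rw [pvG, pvLoopB]
  | cons n ms ih =>
    intro d
    simp only [List.length_cons, List.replicate_succ]
    rw [pvG_group, pvLoopB]
    simp [ih]

lemma pvLoopA_spec (ph_dur : List Int) :
    ∀ (N : Nat) (m r : List Int) (d k : Nat),
      (ph_dur.length - d) + (m.length - k) ≤ N → r.length = m.length →
      pvLoopA ph_dur m r d k = r.take k ++ pvG ph_dur (m.drop k) (r.drop k) d := by
  intro N
  induction N with
  | zero =>
    intro m r d k hN hlen
    have hd : ph_dur.length ≤ d := by omega
    rw [pvLoopA]
    have : ¬ (d < ph_dur.length ∧ k < m.length) := by omega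
    rw [dif_neg this, pvG_stop ph_dur _ _ d hd, List.take_append_drop]
  | succ N ih =>
    intro m r d k hN hlen
    rw [pvLoopA]
    by_cases hc : d < ph_dur.length ∧ k < m.length
    · obtain ⟨hd, hk⟩ := hc
      have hkr : k < r.length := by omega
      have hmd : m.drop k = m[k] :: m.drop (k + 1) := List.drop_eq_getElem_cons hk
      have hrd : r.drop k = r[k] :: r.drop (k + 1) := List.drop_eq_getElem_cons hkr
      rw [dif_pos ⟨hd, hk⟩]
      by_cases hpos : m.getD k 0 > 0
      · rw [if_pos hpos]
        rw [ih (m.set k (m.getD k 0 - 1)) (r.set k (r.getD k 0 + ph_dur.getD d 0)) (d + 1) k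
          (by simp only [List.length_set]; omega) (by simp only [List.length_set]; omega)]
        have hms : (m.set k (m.getD k 0 - 1)).drop k
            = (m.getD k 0 - 1) :: m.drop (k + 1) := by
          rw [List.drop_eq_getElem_cons (by simp only [List.length_set]; omega),
            List.drop_set]
          simp
        have hrs : (r.set k (r.getD k 0 + ph_dur.getD d 0)).drop k
            = (r.getD k 0 + ph_dur.getD d 0) :: r.drop (k + 1) := by
          rw [List.drop_eq_getElem_cons (by simp only [List.length_set]; omega),
            List.drop_set]
          simp
        rw [hms, hrs, List.take_set, List.set_eq_of_length_le (by simp)]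
        congr 1
        rw [hmd, hrd, List.getD_eq_getElem m 0 hk] at *
        rw [List.getD_eq_getElem r 0 hkr,
          pvG_cons ph_dur m[k] (m.drop (k + 1)) r[k] (r.drop (k + 1)) d, if_pos hd,
          if_pos hpos]
      · rw [if_neg hpos]
        rw [ih m r d (k + 1) (by omega) hlen]
        rw [hmd, hrd, pvG_cons, if_pos hd]
        rw [List.getD_eq_getElem m 0 hk] at hpos
        rw [if_neg hpos]
        have htake : r.take (k + 1) = r.take k ++ [r[k]] := List.take_succ_eq_append_getElem hkr
        rw [htake, List.append_assoc]
        rfl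
    · rw [dif_neg hc]
      rcases (by omega : ph_dur.length ≤ d ∨ m.length ≤ k) with h | h
      · rw [pvG_stop ph_dur _ _ d h, List.take_append_drop]
      · rw [List.drop_eq_nil_of_le h, pvG, List.take_of_length_le (by omega),
          List.drop_eq_nil_of_le (by omega)]
        simp

-- ===== VERDICT (by name: the statement is the Claim_ definition above) =====
theorem cumulate_ph_dur_by_ph_num_spec : Claim_equal_cumulate_ph_dur_by_ph_num := by
  intro ph_dur ph_num _ _
  unfold Spec_cumulate_ph_dur_by_ph_num cumulate_ph_dur_by_ph_num cumulate_ph_dur_by_ph_num_alt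
  rw [pvLoopA_spec ph_dur (ph_dur.length + ph_num.length) ph_num
    (List.replicate ph_num.length 0) 0 0 (by omega) (by simp)]
  simp only [List.take_zero, List.drop_zero, List.nil_append]
  exact pvG_eq_loopB ph_dur ph_num 0
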